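-- pv_equiv track=rewrite | github.com/VoidChaser/Lyc | Повторение/6.py | word_chars_analysis
-- ===== SOURCE A (Python) =====
-- def word_chars_analysis(word: str) -> tuple:
--     to_return = {}
--     word_set = tuple(sorted(list(set(word))))
--     for _ in sorted(word):
--         if _ not in to_return:
--             to_return[_] = 1
--         else:
--             to_return[_] += 1
--     return to_return, word_set
-- ===== SOURCE B (Python) =====
-- def word_chars_analysis(word: str) -> tuple:
--     # Run-length grouping of the sorted characters: each maximal run of one
--     # character gives one (char, run_length) item, already in sorted key order.
--     sorted_chars = sorted(word)
--     items = []
--     i = 0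
--     n = len(sorted_chars)
--     while i < n:
--         j = i
--         while j < n and sorted_chars[j] == sorted_chars[i]:
--             j += 1
--         items.append((sorted_chars[i], j - i))
--         i = j
--     return dict(items), tuple(ch for ch, _ in items)
-- ===== Notes on version B (the rewrite author's own statement) =====
-- stated objective: alternative
-- what changed: A accumulates a count dict by updating an entry per character of sorted(word); B run-length-groups the sorted characters with a two-pointer scan, emitting one (char, run length) item per maximal run and deriving the key tuple from the items, with no dict updates or membership tests.
import Mathlib
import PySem

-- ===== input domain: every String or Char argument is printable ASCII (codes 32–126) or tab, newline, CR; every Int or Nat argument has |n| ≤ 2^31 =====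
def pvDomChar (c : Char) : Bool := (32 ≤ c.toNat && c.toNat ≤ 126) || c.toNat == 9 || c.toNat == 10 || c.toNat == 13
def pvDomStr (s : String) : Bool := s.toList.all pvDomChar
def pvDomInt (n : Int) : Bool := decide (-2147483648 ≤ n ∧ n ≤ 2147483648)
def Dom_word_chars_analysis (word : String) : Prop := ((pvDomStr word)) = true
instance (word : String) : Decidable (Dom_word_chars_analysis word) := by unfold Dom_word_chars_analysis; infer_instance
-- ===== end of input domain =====

-- B replaces A's accumulating dict-update pass over sorted(word) with a run-length grouping
-- of the sorted characters (one item per maximal run), a different algorithm of the same cost.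

-- ===== PORT A =====
def word_chars_analysis (word : String) : (List (String × Int)) × List String :=
  -- iterating a Python str yields its characters as 1-char strings
  let chars : List String := word.toList.map (fun c => String.ofList [c])
  let word_set : List String := PySem.List.sorted (PySem.Set.ofList chars) (fun x => x)
  let to_return : PySem.Dict String Int :=
    (PySem.List.sorted chars (fun x => x)).foldl
      (fun d x => if d.contains x = false then d.insert x 1 else d.insert x (d.getD x 0 + 1))
      PySem.Dict.empty
  (to_return.items, word_set)

-- ===== PORT B =====
-- B's outer while loop: each step consumes one maximal run of the head character
-- (the inner 'while sorted_chars[j] == sorted_chars[i]: j += 1' scan is takeWhile/dropWhile).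
def pvRleB : List String → List (String × Int)
  | [] => []
  | x :: xs =>
      (x, ((xs.takeWhile (fun y => y == x)).length + 1 : Int)) ::
        pvRleB (xs.dropWhile (fun y => y == x))
  termination_by l => l.length
  decreasing_by
    simpa using Nat.lt_succ_of_le (List.dropWhile_sublist (l := xs) (p := fun y => y == x)).length_le

def word_chars_analysis_alt (word : String) : (List (String × Int)) × List String :=
  let sorted_chars : List String :=
    PySem.List.sorted (word.toList.map (fun c => String.ofList [c])) (fun x => x)
  let items : List (String × Int) := pvRleB sorted_chars
  ((PySem.Dict.ofList items).items, items.map (fun p => p.1))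

-- ===== PRECONDITION & SPEC =====
def Spec_word_chars_analysis (word : String) (out : (List (String × Int)) × List String) : Prop := out = word_chars_analysis_alt word
instance (word : String) (out : (List (String × Int)) × List String) : Decidable (Spec_word_chars_analysis word out) := by unfold Spec_word_chars_analysis; infer_instance

-- ===== CLAIM (what is proved, stated in full; the proofs are below) =====
def Claim_equal_word_chars_analysis : Prop := ∀ (word : String), Dom_word_chars_analysis word → Spec_word_chars_analysis word (word_chars_analysis word)

-- ===== LEMMAS AND PROOFS =====

-- A's loop body is exactly the 'insert (getD + 1)' counter step
theorem loopA_eq_counter (ys : List String) :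
    ys.foldl
      (fun d x => if d.contains x = false then d.insert x 1 else d.insert x (d.getD x 0 + 1))
      PySem.Dict.empty = PySem.Dict.counter ys := by
  rw [← PySem.Dict.foldl_insert_getD_add_one_eq_counter]
  congr 1
  funext d x
  by_cases hc : d.contains x
  · simp [hc]
  · have hnone : d.get? x = none := by
      rw [PySem.Dict.contains_eq_isSome_get?] at hc
      simpa using hc
    simp [hc, PySem.Dict.getD, hnone]

theorem foldl_add_sublist {α : Type} [BEq α] (xs : List α) (s : PySem.Set α) :
    ∃ t, List.foldl PySem.Set.add s xs = s ++ t ∧ t.Sublist xs := by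
  induction xs generalizing s with
  | nil => exact ⟨[], by simp⟩
  | cons x xs ih =>
      by_cases hc : PySem.Set.contains s x = true
      · obtain ⟨t, ht, hs⟩ := ih s
        refine ⟨t, ?_, hs.cons x⟩
        rw [List.foldl_cons, show PySem.Set.add s x = s from by unfold PySem.Set.add; rw [if_pos hc]]
        exact ht
      · obtain ⟨t, ht, hs⟩ := ih (s ++ [x])
        refine ⟨x :: t, ?_, hs.cons₂ x⟩
        rw [List.foldl_cons, show PySem.Set.add s x = s ++ [x] from by unfold PySem.Set.add; rw [if_neg hc], ht,
          List.append_assoc]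
        rfl

-- set(xs) keeps first occurrences in order, hence is a sublist of xs
theorem ofList_sublist {α : Type} [BEq α] (xs : List α) :
    (PySem.Set.ofList xs).Sublist xs := by
  obtain ⟨t, ht, hs⟩ := foldl_add_sublist xs PySem.Set.empty
  rw [PySem.Set.ofList, ht]
  simpa [PySem.Set.empty] using hs

-- set(sorted(xs)) = sorted(set(xs)) as ordered lists
theorem ofList_sorted_eq (xs : List String) :
    PySem.Set.ofList (PySem.List.sorted xs (fun x => x)) =
    PySem.List.sorted (PySem.Set.ofList xs) (fun x => x) := by
  refine (PySem.List.sorted_eq_of_perm_of_pairwise_lt _ _ _ ?_ ?_).symm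
  · rw [List.perm_ext_iff_of_nodup (PySem.Set.nodup_ofList _) (PySem.Set.nodup_ofList _)]
    intro a
    simp [PySem.Set.mem_ofList, PySem.List.mem_sorted]
  · have hle := List.Pairwise.sublist (ofList_sublist (PySem.List.sorted xs (fun x => x)))
      (PySem.List.sorted_pairwise xs (fun x => x))
    have hne := PySem.Set.nodup_ofList (PySem.List.sorted xs (fun x => x))
    exact (hle.and hne).imp (fun h => lt_of_le_of_ne h.1 h.2)

-- discarding an absent element is the identity
theorem discard_of_not_mem {α : Type} [BEq α] [LawfulBEq α] (s : PySem.Set α) (x : α)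
    (h : x ∉ s) : PySem.Set.discard s x = s := by
  show s.filter (fun y => !(y == x)) = s
  refine List.filter_eq_self.mpr (fun a ha => ?_)
  simp only [Bool.not_eq_eq_eq_not, Bool.not_true, beq_eq_false_iff_ne]
  exact fun he => h (he ▸ ha)

-- set(run ++ rest) with x removed, when run is all x's and x ∉ rest, is set(rest)
theorem discard_ofList_run {α : Type} [BEq α] [LawfulBEq α] (x : α) :
    ∀ (run rest : List α), (∀ a ∈ run, a = x) → x ∉ rest →
    PySem.Set.discard (PySem.Set.ofList (run ++ rest)) x = PySem.Set.ofList rest := by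
  intro run
  induction run with
  | nil =>
      intro rest _ hx
      exact discard_of_not_mem _ _ (fun hm => hx ((PySem.Set.mem_ofList _ _).mp hm))
  | cons a run ih =>
      intro rest hr hx
      have ha : a = x := hr a (List.mem_cons_self)
      rw [List.cons_append, ha, PySem.Set.ofList_cons]
      show (x :: PySem.Set.discard (PySem.Set.ofList (run ++ rest)) x).filter
          (fun y => !(y == x)) = PySem.Set.ofList rest
      rw [List.filter_cons, if_neg (by simp)]
      have hnx : x ∉ PySem.Set.discard (PySem.Set.ofList (run ++ rest)) x := by
        intro hm
        exact ((PySem.Set.mem_discard _ _ _).mp hm).2 rfl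
      calc (PySem.Set.discard (PySem.Set.ofList (run ++ rest)) x).filter (fun y => !(y == x))
          = PySem.Set.discard (PySem.Set.discard (PySem.Set.ofList (run ++ rest)) x) x := rfl
        _ = PySem.Set.discard (PySem.Set.ofList (run ++ rest)) x := discard_of_not_mem _ _ hnx
        _ = PySem.Set.ofList rest := ih rest (fun b hb => hr b (List.mem_cons_of_mem _ hb)) hx

-- in a sorted list, once the head's run is dropped the head never reappears
theorem not_mem_dropWhile_sorted (x : String) :
    ∀ (xs : List String), xs.Pairwise (· ≤ ·) → (∀ a ∈ xs, x ≤ a) →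
    x ∉ xs.dropWhile (fun y => y == x) := by
  intro xs
  induction xs with
  | nil => simp
  | cons a t ih =>
      intro hp hle
      by_cases hax : (a == x) = true
      · rw [List.dropWhile_cons, if_pos hax]
        exact ih hp.tail (fun b hb => hle b (List.mem_cons_of_mem _ hb))
      · rw [List.dropWhile_cons, if_neg hax]
        intro hm
        have hxa : x ≤ a := hle a (List.mem_cons_self)
        have hne : a ≠ x := by simpa using hax
        rcases List.mem_cons.mp hm with h | h
        · exact hne h.symm
        · have hax' : a ≤ x := (List.pairwise_cons.mp hp).1 x h
          exact hne (le_antisymm hax' hxa)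

-- run-length grouping of a sorted list = (distinct elements, their counts), in order
theorem rle_sorted :
    ∀ (cs : List String), cs.Pairwise (· ≤ ·) →
    pvRleB cs = (PySem.Set.ofList cs).map (fun k => (k, (cs.count k : Int))) := by
  intro cs
  induction cs using pvRleB.induct with
  | case1 => simp [pvRleB]
  | case2 x xs ih =>
      intro hp
      have hle : ∀ a ∈ xs, x ≤ a := (List.pairwise_cons.mp hp).1
      have hpt : xs.Pairwise (· ≤ ·) := hp.tail
      set run := xs.takeWhile (fun y => y == x) with hrun
      set rest := xs.dropWhile (fun y => y == x) with hrest
      have hsplit : run ++ rest = xs := List.takeWhile_append_dropWhile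
      have hrall : ∀ a ∈ run, a = x := by
        intro a ha
        have := List.mem_takeWhile_imp ha
        simpa using this
      have hxrest : x ∉ rest := not_mem_dropWhile_sorted x xs hpt hle
      have hprest : rest.Pairwise (· ≤ ·) := hpt.sublist (List.dropWhile_sublist _)
      rw [pvRleB, PySem.Set.ofList_cons, List.map_cons, ← hrun, ← hrest]
      have hcx : (x :: xs).count x = run.length + 1 := by
        rw [List.count_cons_self, ← hsplit, List.count_append,
          List.count_eq_zero.mpr hxrest, List.count_eq_length.mpr
            (fun b hb => by simp [hrall b hb])]
      have hdisc : PySem.Set.discard (PySem.Set.ofList xs) x = PySem.Set.ofList rest := by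
        rw [← hsplit]; exact discard_ofList_run x run rest hrall hxrest
      refine congrArg₂ List.cons (by rw [hcx]; push_cast; ring_nf) ?_
      rw [ih hprest, hdisc]
      refine List.map_congr_left (fun k hk => ?_)
      have hkrest : k ∈ rest := (PySem.Set.mem_ofList _ _).mp hk
      have hknx : x ≠ k := fun he => hxrest (he ▸ hkrest)
      have hkc : (x :: xs).count k = rest.count k := by
        rw [List.count_cons_of_ne hknx, ← hsplit, List.count_append,
          List.count_eq_zero.mpr (fun hkr => hknx.symm (hrall k hkr))]
        omega
      rw [hkc]

-- dict(items) over distinct keys is just the items list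
theorem dict_ofList_items_of_nodup_keys (items : List (String × Int))
    (h : (items.map (fun p => p.1)).Nodup) :
    (PySem.Dict.ofList items).items = items := by
  have he : PySem.Dict.ofList items =
      items.foldl (fun d p => d.insert p.1 p.2) PySem.Dict.empty := rfl
  have h2 := PySem.Dict.items_foldl_insert_fresh (l := items) (k := fun p => p.1)
    (v := fun p => p.2) (d := PySem.Dict.empty) (fun a _ => PySem.Dict.contains_empty _) h
  rw [he, h2]
  simp [PySem.Dict.empty]

-- ===== VERDICT (by name: the statement is the Claim_ definition above) =====
theorem word_chars_analysis_spec : Claim_equal_word_chars_analysis := by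
  intro word _
  unfold Spec_word_chars_analysis word_chars_analysis word_chars_analysis_alt
  dsimp only
  set chars := word.toList.map (fun c => String.ofList [c]) with hchars
  set cs := PySem.List.sorted chars (fun x => x) with hcs
  have hpair : cs.Pairwise (· ≤ ·) := PySem.List.sorted_pairwise chars (fun x => x)
  have hitems : pvRleB cs = (PySem.Set.ofList cs).map (fun k => (k, (cs.count k : Int))) :=
    rle_sorted cs hpair
  have hset : PySem.Set.ofList cs = PySem.List.sorted (PySem.Set.ofList chars) (fun x => x) :=
    ofList_sorted_eq chars
  have hkeys : (pvRleB cs).map (fun p => p.1) = PySem.Set.ofList cs := by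
    rw [hitems, List.map_map]; simp only [Function.comp_def]; exact List.map_id _
  refine Prod.ext ?_ ?_
  · rw [loopA_eq_counter, PySem.Dict.items_counter,
      dict_ofList_items_of_nodup_keys _ (hkeys ▸ PySem.Set.nodup_ofList cs), hitems, hset]
  · rw [hkeys, hset]
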